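-- pv_equiv track=rewrite | github.com/maayanalbert/gender_bender_web | genderbender/genderBender.py | seperateWords
-- ===== SOURCE A (Python) =====
-- import string
--
-- def seperateWords(rawContents):
--     wordArr = [""]
--     letters = set(string.ascii_letters)
--
--     # iterate thrugh every character in the text
--     for i in range(len(rawContents)):
--         char = rawContents[i]
--
--         # isolate man and woman when it appears at the end of a word
--         manLen = len("man")
--         womanLen = len("woman")
--         if(i < len(rawContents)-manLen and
--             (i<2 or rawContents[i-2:i] != "wo" and rawContents[i-2:i] != "hu") and
--             (rawContents[i:i+manLen] == "man" or rawContents[i:i+manLen] == "men")):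
--                 wordArr.append(char)
--
--         elif(i < len(rawContents)-womanLen and
--             (rawContents[i:i+womanLen] == "woman" or rawContents[i:i+womanLen] == "women")):
--                 wordArr.append(char)
--
--         # if it's a letter add it to the most recent word
--         elif(char in letters):
--             wordArr[-1] += char
--
--         # if it isn't append it as an individual item
--         else:
--             wordArr.append(char)
--             wordArr.append("")
--
--     return wordArr
-- ===== SOURCE B (Python) =====
-- import string
--
-- def seperateWords(rawContents):
--     n = len(rawContents)
--     letters = set(string.ascii_letters)
--     # compute the cut positions: each token of the output is a contiguous slice
--     # between two consecutive cuts.  A gender-word start contributes one cut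
--     # (the word break before it); a non-letter contributes two (it is a token
--     # of its own, and a fresh empty word starts right after it).
--     cuts = [0]
--     for i in range(n):
--         if ((i < n - 3
--              and (i < 2 or (rawContents[i-2:i] != "wo" and rawContents[i-2:i] != "hu"))
--              and (rawContents[i:i+3] == "man" or rawContents[i:i+3] == "men"))
--             or (i < n - 5
--                 and (rawContents[i:i+5] == "woman" or rawContents[i:i+5] == "women"))):
--             cuts.append(i)
--         elif rawContents[i] not in letters:
--             cuts.append(i)
--             cuts.append(i + 1)
--     cuts.append(n)
--     # every token is literally the slice between consecutive cuts
--     return [rawContents[a:b] for a, b in zip(cuts, cuts[1:])]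
-- ===== Notes on version B (the rewrite author's own statement) =====
-- stated objective: faster
-- what changed: A assembles tokens character by character in one pass, repeatedly extending the last word of wordArr by string concatenation; B never assembles characters: it computes the list of cut positions (one cut before each gender-word start, two around each non-letter) and emits every output token as a literal slice of the input between consecutive cuts.
import Mathlib
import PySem

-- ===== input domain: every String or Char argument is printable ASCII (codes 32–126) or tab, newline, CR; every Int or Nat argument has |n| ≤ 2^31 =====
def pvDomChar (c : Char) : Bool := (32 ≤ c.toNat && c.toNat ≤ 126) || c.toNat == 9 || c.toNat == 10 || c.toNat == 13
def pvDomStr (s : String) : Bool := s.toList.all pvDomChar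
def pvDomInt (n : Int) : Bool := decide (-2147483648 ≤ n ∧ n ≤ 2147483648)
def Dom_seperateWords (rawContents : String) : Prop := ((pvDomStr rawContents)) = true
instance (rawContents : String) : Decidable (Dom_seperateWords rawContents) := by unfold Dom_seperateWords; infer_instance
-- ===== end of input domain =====

-- B replaces A's character-by-character token assembly (extending the last word of wordArr
-- by repeated concatenation) by a cut-position list — one cut before each gender-word start,
-- two around each non-letter — and emits every token as the literal slice between consecutive
-- cuts (objective: faster, measured; same output).

-- char in set(string.ascii_letters)
def pvIsLetter (c : Char) : Bool :=
  ('a' ≤ c && c ≤ 'z') || ('A' ≤ c && c ≤ 'Z')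

-- wordArr[-1] += char (A-side; wordArr is always nonempty)
def pvAddLast : List String → Char → List String
  | [], c => [String.ofList [c]]
  | [w], c => [String.ofList (w.toList ++ [c])]
  | w :: ws, c => w :: pvAddLast ws c

-- ===== PORT A =====
def seperateWords (rawContents : String) : List String :=
  let cs := rawContents.toList
  let n : Int := cs.length
  (PySem.List.pyRange 0 n 1).foldl (fun wordArr i =>
    let char := PySem.List.pyGetD cs i ' '   -- rawContents[i]; i ∈ range(len) is always in range
    if decide (i < n - 3) &&
        (decide (i < 2) ||
          (!(PySem.List.slice cs (some (i - 2)) (some i) == "wo".toList) &&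
           !(PySem.List.slice cs (some (i - 2)) (some i) == "hu".toList))) &&
        (PySem.List.slice cs (some (i)) (some (i + 3)) == "man".toList ||
         PySem.List.slice cs (some (i)) (some (i + 3)) == "men".toList) then
      wordArr ++ [String.ofList [char]]
    else if decide (i < n - 5) &&
        (PySem.List.slice cs (some (i)) (some (i + 5)) == "woman".toList ||
         PySem.List.slice cs (some (i)) (some (i + 5)) == "women".toList) then
      wordArr ++ [String.ofList [char]]
    else if pvIsLetter char then
      pvAddLast wordArr char
    else
      wordArr ++ [String.ofList [char], ""]) [""]

-- ===== PORT B =====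
-- the combined man/men-or-woman/women condition of Source B's single `if`
def pvIsGenderStart (cs : List Char) (n i : Int) : Bool :=
  (decide (i < n - 3) &&
     (decide (i < 2) ||
       (!(PySem.List.slice cs (some (i - 2)) (some i) == "wo".toList) &&
        !(PySem.List.slice cs (some (i - 2)) (some i) == "hu".toList))) &&
     (PySem.List.slice cs (some (i)) (some (i + 3)) == "man".toList ||
      PySem.List.slice cs (some (i)) (some (i + 3)) == "men".toList))
  || (decide (i < n - 5) &&
      (PySem.List.slice cs (some (i)) (some (i + 5)) == "woman".toList ||
       PySem.List.slice cs (some (i)) (some (i + 5)) == "women".toList))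

def seperateWords_alt (rawContents : String) : List String :=
  let cs := rawContents.toList
  let n : Int := cs.length
  let cuts : List Int :=
    ((PySem.List.pyRange 0 n 1).foldl (fun cuts i =>
      if pvIsGenderStart cs n i then cuts ++ [i]
      else if !(pvIsLetter (PySem.List.pyGetD cs i ' ')) then cuts ++ [i, i + 1]
      else cuts) [0]) ++ [n]
  (cuts.zip cuts.tail).map (fun ab =>
    String.ofList (PySem.List.slice cs (some ab.1) (some ab.2)))

-- ===== PRECONDITION & SPEC =====
def Spec_seperateWords (rawContents : String) (out : List String) : Prop := out = seperateWords_alt rawContents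
instance (rawContents : String) (out : List String) : Decidable (Spec_seperateWords rawContents out) := by unfold Spec_seperateWords; infer_instance

-- ===== CLAIM (what is proved, stated in full; the proofs are below) =====
def Claim_equal_seperateWords : Prop := ∀ (rawContents : String), Dom_seperateWords rawContents → Spec_seperateWords rawContents (seperateWords rawContents)

-- ===== LEMMAS AND PROOFS =====

-- Nat-level gender/letter tests at index j (cs fixed)
def pvG (cs : List Char) (j : Nat) : Bool := pvIsGenderStart cs (cs.length : Int) (j : Int)
def pvL (cs : List Char) (j : Nat) : Bool := pvIsLetter (PySem.List.pyGetD cs (j : Int) ' ')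

def pvCast (k : Nat) : Int := k

-- model of A's loop over indices [0, i)
def pvFoldA (cs : List Char) (i : Nat) : List String :=
  (List.range i).foldl (fun wordArr j =>
    if pvG cs j then wordArr ++ [String.ofList [PySem.List.pyGetD cs (j : Int) ' ']]
    else if pvL cs j then pvAddLast wordArr (PySem.List.pyGetD cs (j : Int) ' ')
    else wordArr ++ [String.ofList [PySem.List.pyGetD cs (j : Int) ' '], ""]) [""]

-- model of B's inner cut list (without the leading 0 and the trailing n), at Nat level
def pvInner (cs : List Char) (i : Nat) : List Nat :=
  (List.range i).foldl (fun cuts j =>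
    if pvG cs j then cuts ++ [j]
    else if !(pvL cs j) then cuts ++ [j, j + 1]
    else cuts) []

-- the token between cuts a and b
def pvTok (cs : List Char) (a b : Nat) : String :=
  String.ofList (PySem.List.slice cs (some (a : Int)) (some (b : Int)))

-- the tokens of the cut list a :: l
def pvToks (cs : List Char) : Nat → List Nat → List String
  | _, [] => []
  | a, b :: l => pvTok cs a b :: pvToks cs b l

lemma pv_getLastD_snoc (l : List Nat) (e a : Nat) : (l ++ [e]).getLastD a = e := by
  rw [List.getLastD_eq_getLast?, List.getLast?_concat]
  rfl

lemma pv_toks_snoc (cs : List Char) (l : List Nat) (a e : Nat) :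
    pvToks cs a (l ++ [e]) = pvToks cs a l ++ [pvTok cs (l.getLastD a) e] := by
  induction l generalizing a with
  | nil => simp [pvToks]
  | cons b l ih =>
    simp only [List.cons_append, pvToks]
    rw [ih, List.getLastD_cons]

lemma pv_addLast_snoc (T : List String) (x : String) (c : Char) :
    pvAddLast (T ++ [x]) c = T ++ [String.ofList (x.toList ++ [c])] := by
  induction T with
  | nil => rfl
  | cons h t ih =>
    cases t with
    | nil => simp [pvAddLast]
    | cons a b => simpa [pvAddLast] using ih

lemma pv_tok_nil (cs : List Char) (i : Nat) : pvTok cs i i = "" := by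
  simp [pvTok, PySem.List.slice_natCast]

lemma pv_tok_single (cs : List Char) (i : Nat) (hi : i < cs.length) :
    pvTok cs i (i + 1) = String.ofList [PySem.List.pyGetD cs (i : Int) ' '] := by
  have h : ((i + 1 : Nat) : Int) = ((i : Nat) : Int) + ((1 : Nat) : Int) := by push_cast; omega
  rw [pvTok, PySem.List.pyGetD_natCast, List.getD_eq_getElem cs ' ' hi, h,
      PySem.List.slice_natCast_add]
  congr 1
  rw [List.take_one, List.head?_drop, List.getElem?_eq_getElem hi]
  rfl

lemma pv_tok_succ (cs : List Char) (g i : Nat) (hg : g ≤ i) (hi : i < cs.length) :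
    String.ofList ((pvTok cs g i).toList ++ [PySem.List.pyGetD cs (i : Int) ' ']) =
      pvTok cs g (i + 1) := by
  have h1 : ((i : Nat) : Int) = ((g : Nat) : Int) + ((i - g : Nat) : Int) := by omega
  have h2 : ((i + 1 : Nat) : Int) = ((g : Nat) : Int) + ((i - g + 1 : Nat) : Int) := by
    push_cast; omega
  rw [PySem.List.pyGetD_natCast, List.getD_eq_getElem cs ' ' hi, pvTok, pvTok, h1, h2,
      PySem.List.slice_natCast_add, PySem.List.slice_natCast_add]
  congr 1
  simp only [String.toList_ofList]
  rw [List.take_add_one, List.getElem?_drop]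
  have h3 : g + (i - g) = i := by omega
  rw [h3, List.getElem?_eq_getElem hi]
  rfl

-- the invariant: A's loop state over [0,i) is exactly the tokens of the cut list so far
lemma pv_inv (cs : List Char) :
    ∀ i, i ≤ cs.length →
      pvFoldA cs i = pvToks cs 0 (pvInner cs i ++ [i]) ∧ (pvInner cs i).getLastD 0 ≤ i := by
  intro i
  induction i with
  | zero =>
    intro _
    refine ⟨?_, by simp [pvInner]⟩
    simp [pvFoldA, pvInner, pvToks, pv_tok_nil]
  | succ i ih =>
    intro h
    have hi : i < cs.length := by omega
    obtain ⟨h1, h2⟩ := ih (by omega)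
    have stepA : pvFoldA cs (i + 1) =
        (if pvG cs i then pvFoldA cs i ++ [String.ofList [PySem.List.pyGetD cs (i : Int) ' ']]
         else if pvL cs i then pvAddLast (pvFoldA cs i) (PySem.List.pyGetD cs (i : Int) ' ')
         else pvFoldA cs i ++ [String.ofList [PySem.List.pyGetD cs (i : Int) ' '], ""]) := by
      rw [pvFoldA, List.range_succ, List.foldl_append]; rfl
    have stepB : pvInner cs (i + 1) =
        (if pvG cs i then pvInner cs i ++ [i]
         else if !(pvL cs i) then pvInner cs i ++ [i, i + 1]
         else pvInner cs i) := by
      rw [pvInner, List.range_succ, List.foldl_append]; rfl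
    by_cases hG : pvG cs i = true
    · rw [stepA, stepB, if_pos hG, if_pos hG]
      refine ⟨?_, by rw [pv_getLastD_snoc]; omega⟩
      rw [pv_toks_snoc, pv_getLastD_snoc, pv_tok_single cs i hi, h1]
    · by_cases hL : pvL cs i = true
      · rw [stepA, stepB, if_neg hG, if_neg hG, if_pos hL, hL]
        simp only [Bool.not_true, Bool.false_eq_true, if_false]
        refine ⟨?_, by omega⟩
        rw [h1, pv_toks_snoc, pv_toks_snoc, pv_addLast_snoc,
            pv_tok_succ cs _ i h2 hi]
      · have hL' : (!(pvL cs i)) = true := by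
          cases hLv : pvL cs i
          · rfl
          · exact absurd hLv hL
        rw [stepA, stepB, if_neg hG, if_neg hG, if_neg hL, if_pos hL']
        constructor
        · have e : pvInner cs i ++ [i, i + 1] ++ [i + 1] =
              ((pvInner cs i ++ [i]) ++ [i + 1]) ++ [i + 1] := by simp
          rw [e, pv_toks_snoc, pv_toks_snoc, pv_getLastD_snoc, pv_getLastD_snoc,
              pv_tok_nil, pv_tok_single cs i hi, h1]
          simp
        · have e : pvInner cs i ++ [i, i + 1] = (pvInner cs i ++ [i]) ++ [i + 1] := by simp
          rw [e, pv_getLastD_snoc]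

-- A's port computes the model fold
lemma pv_A_model (s : String) : seperateWords s = pvFoldA s.toList s.toList.length := by
  unfold seperateWords pvFoldA
  dsimp only
  rw [PySem.List.pyRange_zero_natCast, List.foldl_map]
  refine PySem.List.foldl_congr_mem' _ _ _ _ ?_
  intro j _ acc
  simp only [pvG, pvL, pvIsGenderStart]
  cases hb1 : (decide ((j : Int) < (s.toList.length : Int) - 3) &&
      (decide ((j : Int) < 2) ||
        (!(PySem.List.slice s.toList (some ((j : Int) - 2)) (some (j : Int)) == "wo".toList) &&
         !(PySem.List.slice s.toList (some ((j : Int) - 2)) (some (j : Int)) == "hu".toList))) &&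
      (PySem.List.slice s.toList (some (j : Int)) (some ((j : Int) + 3)) == "man".toList ||
       PySem.List.slice s.toList (some (j : Int)) (some ((j : Int) + 3)) == "men".toList)) <;>
    cases hb2 : (decide ((j : Int) < (s.toList.length : Int) - 5) &&
      (PySem.List.slice s.toList (some (j : Int)) (some ((j : Int) + 5)) == "woman".toList ||
       PySem.List.slice s.toList (some (j : Int)) (some ((j : Int) + 5)) == "women".toList)) <;>
    simp

-- B's inner fold is the cast of the Nat-level cut list
lemma pv_B_inner (cs : List Char) :
    ∀ i : Nat, (PySem.List.pyRange 0 (i : Int) 1).foldl (fun cuts j =>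
        if pvIsGenderStart cs (cs.length : Int) j then cuts ++ [j]
        else if !(pvIsLetter (PySem.List.pyGetD cs j ' ')) then cuts ++ [j, j + 1]
        else cuts) [0] =
      (0 : Int) :: (pvInner cs i).map pvCast := by
  intro i
  induction i with
  | zero => simp [pvInner]

  | succ i ih =>
    have hc : ((i + 1 : Nat) : Int) = ((i : Nat) : Int) + 1 := by push_cast; ring
    rw [hc, PySem.List.pyRange_one_succ_right (Int.natCast_nonneg i),
        List.foldl_append, ih]
    have stepB : pvInner cs (i + 1) =
        (if pvG cs i then pvInner cs i ++ [i]
         else if !(pvL cs i) then pvInner cs i ++ [i, i + 1]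
         else pvInner cs i) := by
      rw [pvInner, List.range_succ, List.foldl_append]; rfl
    rw [stepB]
    simp only [List.foldl_cons, List.foldl_nil]
    show (if pvG cs i then _ else _) = _
    by_cases hG : pvG cs i = true
    · rw [if_pos hG, if_pos hG]
      simp [pvCast]
    · rw [if_neg hG, if_neg hG]
      have hpl : (!pvIsLetter (PySem.List.pyGetD cs ((i : Nat) : Int) ' ')) = (!pvL cs i) := rfl
      rw [hpl]
      by_cases hL : (!(pvL cs i)) = true
      · rw [if_pos hL, if_pos hL]
        simp only [List.map_append, List.map_cons, List.map_nil]
        simp [pvCast]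
      · rw [if_neg hL, if_neg hL]

-- zipping consecutive cast cuts and slicing yields pvToks
lemma pv_zip_toks (cs : List Char) (l : List Nat) :
    ∀ (a : Nat),
      ((((a :: l).map pvCast)).zip (((a :: l).map pvCast).tail)).map
        (fun ab => String.ofList (PySem.List.slice cs (some ab.1) (some ab.2))) =
      pvToks cs a l := by
  induction l with
  | nil => intro a; simp [pvToks]
  | cons b l ih =>
    intro a
    simp only [List.map_cons, List.tail_cons, List.zip_cons_cons, List.map_cons]
    have hb := ih b
    simp only [List.map_cons, List.tail_cons] at hb
    rw [pvToks, hb]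
    rfl

-- B's port computes the model tokens
lemma pv_B_model (s : String) :
    seperateWords_alt s =
      pvToks s.toList 0 (pvInner s.toList s.toList.length ++ [s.toList.length]) := by
  unfold seperateWords_alt
  dsimp only
  rw [pv_B_inner]
  have e : ((0 : Int) :: (pvInner s.toList s.toList.length).map pvCast) ++
      [(s.toList.length : Int)] =
      ((0 : Nat) :: (pvInner s.toList s.toList.length ++ [s.toList.length])).map pvCast := by
    simp [pvCast]
  rw [e, pv_zip_toks]

-- ===== VERDICT (by name: the statement is the Claim_ definition above) =====
theorem seperateWords_spec : Claim_equal_seperateWords := by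
  intro s _
  show seperateWords s = seperateWords_alt s
  rw [pv_A_model, pv_B_model, (pv_inv s.toList s.toList.length le_rfl).1]
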